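-- pv_equiv track=rewrite | github.com/Sdip25588/Taunggyi2025 | voice_engine.py | _break_into_syllables
-- ===== SOURCE A (Python) =====
-- def _break_into_syllables(word: str) -> str:
--     """
--     Simple syllable breakdown for pronunciation guidance.
--     Uses vowel clusters as syllable boundaries.
--     """
--     vowels = "aeiouAEIOU"
--     if len(word) <= 3:
--         return " - ".join(word.upper())
--
--     syllables = []
--     current = ""
--     for i, char in enumerate(word):
--         current += char
--         # Break after vowel followed by consonant followed by vowel
--         if (i < len(word) - 2 and char.lower() in vowels
--                 and word[i + 1].lower() not in vowels
--                 and i + 2 < len(word) and word[i + 2].lower() in vowels):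
--             syllables.append(current)
--             current = ""
--
--     if current:
--         syllables.append(current)
--
--     return " - ".join(syllables) if len(syllables) > 1 else word
-- ===== SOURCE B (Python) =====
-- def _break_into_syllables(word: str) -> str:
--     """Same behaviour as A, written as: collect all cut positions with one
--     comprehension, then slice the word at those bounds (no running accumulator)."""
--     vowels = "aeiouAEIOU"
--     if len(word) <= 3:
--         return " - ".join(word.upper())
--     n = len(word)
--     cuts = [i + 1 for i in range(n - 2)
--             if word[i].lower() in vowels
--             and word[i + 1].lower() not in vowels
--             and word[i + 2].lower() in vowels]
--     if not cuts:
--         return word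
--     bounds = [0] + cuts + [n]
--     return " - ".join(word[a:b] for a, b in zip(bounds, bounds[1:]))
-- ===== Notes on version B (the rewrite author's own statement) =====
-- stated objective: alternative
-- what changed: Replaces the single accumulating loop (growing `current`, flushing it into `syllables` on each break) with a declarative two-phase computation: one comprehension collects all cut indices, then the word is partitioned by slicing at those bounds with zip.
import Mathlib
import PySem

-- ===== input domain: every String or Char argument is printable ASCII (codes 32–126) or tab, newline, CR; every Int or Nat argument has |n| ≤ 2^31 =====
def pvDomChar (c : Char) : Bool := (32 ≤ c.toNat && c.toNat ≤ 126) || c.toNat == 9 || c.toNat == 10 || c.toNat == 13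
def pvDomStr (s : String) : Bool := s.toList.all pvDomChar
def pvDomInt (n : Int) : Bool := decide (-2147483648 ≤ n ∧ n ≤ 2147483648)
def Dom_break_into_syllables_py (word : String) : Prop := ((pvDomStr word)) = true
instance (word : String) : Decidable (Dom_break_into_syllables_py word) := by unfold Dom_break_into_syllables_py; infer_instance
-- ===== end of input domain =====

-- B replaces A's accumulating loop with a cut-index comprehension plus slicing; same results, same cost.

-- char.lower() in "aeiouAEIOU"  (used verbatim by both Pythons)
def pvVow (c : Char) : Bool := ("aeiouAEIOU".toList).contains (PySem.Chars.lowerChar c)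

-- ===== PORT A =====
def break_into_syllables_py (word : String) : String :=
  let ws := word.toList
  let n := ws.length
  if n ≤ 3 then
    -- " - ".join(word.upper())
    String.ofList (PySem.Chars.join " - ".toList ((PySem.Chars.upper ws).map (fun c => [c])))
  else
    -- for i, char in enumerate(word): current += char; if …: syllables.append(current); current = ""
    let st := (PySem.List.enumerate ws 0).foldl
      (fun (st : List (List Char) × List Char) (p : Int × Char) =>
        let cur := st.2 ++ [p.2]
        if decide (p.1 < (n : Int) - 2) && pvVow p.2
            && ((PySem.List.pyGet? ws (p.1 + 1)).elim false (fun d => !pvVow d))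
            && decide (p.1 + 2 < (n : Int))
            && ((PySem.List.pyGet? ws (p.1 + 2)).elim false pvVow)
        then (st.1 ++ [cur], [])
        else (st.1, cur))
      ([], [])
    let sylls := if st.2.isEmpty then st.1 else st.1 ++ [st.2]
    if sylls.length > 1 then String.ofList (PySem.Chars.join " - ".toList sylls) else word

-- ===== PORT B =====
def break_into_syllables_py_alt (word : String) : String :=
  let ws := word.toList
  let n := ws.length
  if n ≤ 3 then
    String.ofList (PySem.Chars.join " - ".toList ((PySem.Chars.upper ws).map (fun c => [c])))
  else
    -- cuts = [i+1 for i in range(n-2) if v(word[i]) and not v(word[i+1]) and v(word[i+2])]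
    let cuts := ((PySem.List.pyRange 0 ((n : Int) - 2) 1).filter (fun i =>
        ((PySem.List.pyGet? ws i).elim false pvVow)
        && ((PySem.List.pyGet? ws (i + 1)).elim false (fun d => !pvVow d))
        && ((PySem.List.pyGet? ws (i + 2)).elim false pvVow))).map (· + 1)
    if cuts.isEmpty then word
    else
      -- bounds = [0] + cuts + [n];  " - ".join(word[a:b] for a, b in zip(bounds, bounds[1:]))
      let bounds : List Int := 0 :: cuts ++ [(n : Int)]
      let parts := (bounds.zip bounds.tail).map
        (fun ab => PySem.List.slice ws (some ab.1) (some ab.2))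
      String.ofList (PySem.Chars.join " - ".toList parts)

-- ===== PRECONDITION & SPEC =====
def Spec_break_into_syllables_py (word : String) (out : String) : Prop := out = break_into_syllables_py_alt word
instance (word : String) (out : String) : Decidable (Spec_break_into_syllables_py word out) := by unfold Spec_break_into_syllables_py; infer_instance

-- ===== CLAIM (what is proved, stated in full; the proofs are below) =====
def Claim_equal_break_into_syllables_py : Prop := ∀ (word : String), Dom_break_into_syllables_py word → Spec_break_into_syllables_py word (break_into_syllables_py word)

-- ===== LEMMAS AND PROOFS =====

-- Nat-level break predicate: vowel, consonant, vowel at i, i+1, i+2 (with the bound i+2 < len)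
def pvBrk (ws : List Char) (i : Nat) : Bool :=
  decide (i + 2 < ws.length) && (ws[i]?.elim false pvVow)
    && (ws[i+1]?.elim false (fun d => !pvVow d)) && (ws[i+2]?.elim false pvVow)

-- cut positions produced by the first k loop iterations
def pvCutsTo (ws : List Char) (k : Nat) : List Nat :=
  ((List.range k).filter (pvBrk ws)).map (· + 1)

def pvLast (cs : List Nat) : Nat := (0 :: cs).getLast (by simp)

-- the segments delimited by consecutive bounds 0, c₁, …, cₘ
def pvSegs (ws : List Char) (cs : List Nat) : List (List Char) :=
  ((0 :: cs).zip cs).map (fun ab => (ws.drop ab.1).take (ab.2 - ab.1))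

-- full partition: bounds 0, c₁, …, cₘ, len
def pvParts (ws : List Char) (cs : List Nat) : List (List Char) :=
  ((0 :: cs).zip (cs ++ [ws.length])).map (fun ab => (ws.drop ab.1).take (ab.2 - ab.1))

-- Nat-level rendering of A's loop body
def pvStep (ws : List Char) (st : List (List Char) × List Char) (i : Nat) :
    List (List Char) × List Char :=
  let cur := st.2 ++ [ws.getD i 'a']
  if pvBrk ws i then (st.1 ++ [cur], []) else (st.1, cur)

lemma pv_bool5 (d a b c : Bool) : ((((d && a) && b) && d) && c) = (((d && a) && b) && c) := by
  cases d <;> cases a <;> cases b <;> cases c <;> rfl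

lemma pvCutsTo_succ (ws : List Char) (k : Nat) :
    pvCutsTo ws (k+1) =
      if pvBrk ws k then pvCutsTo ws k ++ [k+1] else pvCutsTo ws k := by
  simp only [pvCutsTo, List.range_succ, List.filter_append, List.map_append, List.filter_cons]
  by_cases h : pvBrk ws k = true <;> simp [h]

lemma pv_mem_cutsTo {ws : List Char} {k c : Nat} (h : c ∈ pvCutsTo ws k) :
    c ≤ k ∧ c < ws.length ∧ 0 < c := by
  simp only [pvCutsTo, List.mem_map, List.mem_filter, List.mem_range] at h
  obtain ⟨i, ⟨hik, hbrk⟩, rfl⟩ := h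
  simp only [pvBrk, Bool.and_eq_true, decide_eq_true_eq] at hbrk
  exact ⟨by omega, by omega, by omega⟩

lemma pvLast_le (ws : List Char) (k : Nat) : pvLast (pvCutsTo ws k) ≤ k := by
  have hm := List.getLast_mem (l := 0 :: pvCutsTo ws k) (by simp)
  rcases List.mem_cons.mp hm with h | h
  · simp [pvLast, h]
  · exact le_trans (le_of_eq rfl) (by rw [pvLast]; have := pv_mem_cutsTo (ws := ws) (k := k) (by
      rw [show (0 :: pvCutsTo ws k).getLast (by simp) = (0 :: pvCutsTo ws k).getLast (by simp) from rfl] at h; exact h); exact this.1)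

lemma pvLast_lt_len (ws : List Char) (k : Nat) (h0 : 0 < ws.length) :
    pvLast (pvCutsTo ws k) < ws.length := by
  have hm := List.getLast_mem (l := 0 :: pvCutsTo ws k) (by simp)
  rcases List.mem_cons.mp hm with h | h
  · rw [pvLast, h]; exact h0
  · rw [pvLast]; exact (pv_mem_cutsTo h).2.1

lemma pv_zip_cons_append {α : Type} (a b : α) (cs : List α) :
    (a :: cs).zip (cs ++ [b]) =
      (a :: cs).zip cs ++ [((a :: cs).getLast (by simp), b)] := by
  induction cs generalizing a with
  | nil => simp
  | cons c cs ih =>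
      simp only [List.cons_append, List.zip_cons_cons, ih c]
      simp [List.getLast_cons]

lemma pv_zip_shift {α : Type} (a b : α) (cs : List α) :
    (a :: (cs ++ [b])).zip (cs ++ [b]) =
      (a :: cs).zip cs ++ [((a :: cs).getLast (by simp), b)] := by
  induction cs generalizing a with
  | nil => simp
  | cons c cs ih =>
      simp only [List.cons_append, List.zip_cons_cons, ih c]
      simp [List.getLast_cons]

lemma pvSegs_append (ws : List Char) (cs : List Nat) (m : Nat) :
    pvSegs ws (cs ++ [m]) =
      pvSegs ws cs ++ [(ws.drop (pvLast cs)).take (m - pvLast cs)] := by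
  simp only [pvSegs, pvLast]
  rw [show (0 :: (cs ++ [m])) = 0 :: (cs ++ [m]) from rfl, pv_zip_shift (0 : Nat) m cs]
  simp

lemma pvParts_eq (ws : List Char) (cs : List Nat) :
    pvParts ws cs = pvSegs ws cs ++ [(ws.drop (pvLast cs)).take (ws.length - pvLast cs)] := by
  simp only [pvParts, pvLast]
  rw [pv_zip_cons_append (0 : Nat) ws.length cs]
  simp [pvSegs]

lemma pvLoop_inv (ws : List Char) :
    ∀ k, k ≤ ws.length →
      (List.range k).foldl (pvStep ws) ([], []) =
        (pvSegs ws (pvCutsTo ws k), (ws.take k).drop (pvLast (pvCutsTo ws k))) := by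
  intro k
  induction k with
  | zero => intro _; simp [pvCutsTo, pvSegs, pvLast]
  | succ k ih =>
      intro hk
      have hk' : k ≤ ws.length := by omega
      have hklt : k < ws.length := by omega
      rw [List.range_succ, List.foldl_append, ih hk']
      have hle : pvLast (pvCutsTo ws k) ≤ k := pvLast_le ws k
      have hget : ws.getD k 'a' = ws[k] := by
        simp [List.getD, hklt]
      have hcur : (ws.take k).drop (pvLast (pvCutsTo ws k)) ++ [ws[k]] =
          (ws.take (k+1)).drop (pvLast (pvCutsTo ws k)) := by
        rw [List.take_add_one]
        rw [List.drop_append_of_le_length (by simpa [List.length_take] using by omega)]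
        simp [hklt]
      simp only [List.foldl_cons, List.foldl_nil, pvStep, hget, hcur]
      rw [pvCutsTo_succ]
      by_cases hb : pvBrk ws k = true
      · have hl : pvLast (pvCutsTo ws k ++ [k+1]) = k + 1 := by
          simp [pvLast]
        simp only [hb, if_true]
        rw [pvSegs_append, hl, ← List.drop_take]
        rw [List.drop_eq_nil_of_le (as := List.take (k+1) ws) (i := k+1) (by simp)]
      · simp [hb]

lemma pv_brk_false_of_ge {ws : List Char} {i : Nat} (h : ws.length ≤ i + 2) :
    pvBrk ws i = false := by
  simp [pvBrk, show ¬ (i + 2 < ws.length) by omega]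

lemma pvCutsTo_len (ws : List Char) (h : 2 ≤ ws.length) :
    pvCutsTo ws ws.length = pvCutsTo ws (ws.length - 2) := by
  simp only [pvCutsTo]
  congr 1
  rw [show ws.length = (ws.length - 2) + 2 by omega, List.range_add, List.filter_append]
  rw [show List.filter (pvBrk ws) (List.map (fun x => ws.length - 2 + x) (List.range 2)) = [] from ?_]
  · simp
  · rw [List.filter_map]
    rw [List.filter_eq_nil_iff.mpr]
    · simp
    · intro x hx
      simp only [Function.comp]
      rw [pv_brk_false_of_ge (by simp at hx ⊢; omega)]
      simp

-- A's fold (after converting enumerate to a range fold) is pvStep's fold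
lemma pvFoldA_eq (ws : List Char) :
    (PySem.List.enumerate ws 0).foldl
      (fun (st : List (List Char) × List Char) (p : Int × Char) =>
        let cur := st.2 ++ [p.2]
        if decide (p.1 < (ws.length : Int) - 2) && pvVow p.2
            && ((PySem.List.pyGet? ws (p.1 + 1)).elim false (fun d => !pvVow d))
            && decide (p.1 + 2 < (ws.length : Int))
            && ((PySem.List.pyGet? ws (p.1 + 2)).elim false pvVow)
        then (st.1 ++ [cur], [])
        else (st.1, cur))
      ([], []) =
      (List.range ws.length).foldl (pvStep ws) ([], []) := by
  rw [PySem.List.enumerate_eq_map_pyRange ws 'a', PySem.List.pyRange_one, List.foldl_map,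
      List.foldl_map]
  rw [show ((PySem.List.len ws : Int) - 0).toNat = ws.length by simp]
  apply PySem.List.foldl_congr_mem
  intro acc i hi
  have hin : i < ws.length := List.mem_range.mp hi
  have e1 : ((i : Int) + 1) = ((i + 1 : Nat) : Int) := by push_cast; ring
  have e2 : ((i : Int) + 2) = ((i + 2 : Nat) : Int) := by push_cast; ring
  simp only [zero_add, e1, e2, PySem.List.pyGet?_natCast, PySem.List.pyGetD_natCast]
  have hg : ws.getD i 'a' = ws[i] := List.getD_eq_getElem ws 'a' hin
  have hs : ws[i]? = some ws[i] := List.getElem?_eq_getElem hin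
  have d1 : (decide ((i : Int) < (ws.length : Int) - 2)) = decide (i + 2 < ws.length) := by
    rw [decide_eq_decide]; omega
  have d2 : (decide (((i + 2 : Nat) : Int) < (ws.length : Int))) = decide (i + 2 < ws.length) := by
    rw [decide_eq_decide]; omega
  simp only [pvStep, pvBrk, hg, hs, Option.elim_some, d1, d2, pv_bool5]
lemma pvSegs_length (ws : List Char) (cs : List Nat) : (pvSegs ws cs).length = cs.length := by
  simp [pvSegs]

lemma pvCutsB (ws : List Char) :
    ((PySem.List.pyRange 0 ((ws.length : Int) - 2) 1).filter (fun i =>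
        ((PySem.List.pyGet? ws i).elim false pvVow)
        && ((PySem.List.pyGet? ws (i + 1)).elim false (fun d => !pvVow d))
        && ((PySem.List.pyGet? ws (i + 2)).elim false pvVow))).map (· + 1)
      = (pvCutsTo ws (ws.length - 2)).map (Nat.cast : Nat → Int) := by
  rw [PySem.List.pyRange_one]
  rw [show (((ws.length : Int) - 2) - 0).toNat = ws.length - 2 by omega]
  rw [List.filter_map]
  have hc : ∀ i ∈ List.range (ws.length - 2),
      ((fun (j : Int) =>
        ((PySem.List.pyGet? ws j).elim false pvVow)
        && ((PySem.List.pyGet? ws (j + 1)).elim false (fun d => !pvVow d))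
        && ((PySem.List.pyGet? ws (j + 2)).elim false pvVow)) ∘ (fun k : Nat => (0 : Int) + k)) i
      = pvBrk ws i := by
    intro i hi
    have hin : i + 2 < ws.length := by have := List.mem_range.mp hi; omega
    have e1 : ((i : Int) + 1) = ((i + 1 : Nat) : Int) := by push_cast; ring
    have e2 : ((i : Int) + 2) = ((i + 2 : Nat) : Int) := by push_cast; ring
    simp only [Function.comp, zero_add, e1, e2, PySem.List.pyGet?_natCast,
      PySem.List.pyGet?_natCast, pvBrk]
    simp [hin, Bool.and_assoc]
  rw [List.filter_congr hc]
  simp only [pvCutsTo, List.map_map, Function.comp_def]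
  apply List.map_congr_left
  intro i _
  push_cast
  ring

lemma pvPartsB (ws : List Char) (cs : List Nat) :
    ((0 :: (cs ++ [ws.length])).zip (cs ++ [ws.length])).map
        (fun ab => (ws.drop ab.1).take (ab.2 - ab.1)) = pvParts ws cs := by
  rw [pv_zip_shift, pvParts, pv_zip_cons_append]

-- ===== VERDICT (by name: the statement is the Claim_ definition above) =====
theorem break_into_syllables_py_spec : Claim_equal_break_into_syllables_py := by
  intro word _
  unfold Spec_break_into_syllables_py
  by_cases h : word.toList.length ≤ 3
  · simp only [break_into_syllables_py, break_into_syllables_py_alt, if_pos h]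
  · simp only [break_into_syllables_py, break_into_syllables_py_alt, if_neg h]
    rw [pvFoldA_eq word.toList, pvLoop_inv word.toList word.toList.length le_rfl,
        List.take_length, pvCutsB word.toList, ← pvCutsTo_len word.toList (by omega)]
    have hj : pvLast (pvCutsTo word.toList word.toList.length) < word.toList.length :=
      pvLast_lt_len word.toList _ (by omega)
    generalize hcs : pvCutsTo word.toList word.toList.length = cs at *
    have hde : (List.drop (pvLast cs) word.toList).isEmpty = false := by
      cases hE : (List.drop (pvLast cs) word.toList).isEmpty with
      | false => rfl
      | true =>
          exfalso
          have h0 : List.drop (pvLast cs) word.toList = [] := List.isEmpty_iff.mp hE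
          have h1 : word.toList.length - pvLast cs = 0 := by
            rw [← List.length_drop, h0]; rfl
          omega
    simp only [hde, Bool.false_eq_true, if_false, List.isEmpty_map]
    have hparts : pvSegs word.toList cs ++ [List.drop (pvLast cs) word.toList]
        = pvParts word.toList cs := by
      rw [pvParts_eq, List.take_of_length_le (by simp)]
    rw [hparts]
    have hlen2 : (pvParts word.toList cs).length = cs.length + 1 := by
      rw [← hparts]; simp [pvSegs_length]
    by_cases hcse : cs = []
    · subst hcse
      simp [hlen2]
    · have hpos : 0 < cs.length := List.length_pos_iff.mpr hcse
      rw [show cs.isEmpty = false by simpa [List.isEmpty_iff] using hcse]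
      simp only [Bool.false_eq_true, if_false]
      rw [if_pos (by rw [hlen2]; omega)]
      congr 1
      have hb : (0 : Int) :: List.map Nat.cast cs ++ [(word.toList.length : Int)]
          = List.map (Nat.cast : Nat → Int) (0 :: (cs ++ [word.toList.length])) := by simp
      rw [hb]
      rw [show (List.map (Nat.cast : Nat → Int) (0 :: (cs ++ [word.toList.length]))).tail
            = List.map (Nat.cast : Nat → Int) (cs ++ [word.toList.length]) from rfl]
      rw [List.zip_map, List.map_map]
      rw [List.map_congr_left (l := (0 :: (cs ++ [word.toList.length])).zip (cs ++ [word.toList.length]))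
            (g := fun ab => (word.toList.drop ab.1).take (ab.2 - ab.1))
            (fun ab _ => by
              simp only [Function.comp, Prod.map]
              exact PySem.List.slice_natCast word.toList ab.1 ab.2)]
      rw [pvPartsB]
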